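-- pv_equiv track=rewrite | github.com/aberke/lbs-data | trajectory_transformers.py | get_nighttime_hours
-- ===== SOURCE A (Python) =====
-- NIGHTTIME_ENDHOUR = 9  # non inclusive
--
-- NIGHTTIME_STARTHOUR = 20  # inclusive
--
-- def get_nighttime_hours(total_hours):
-- 	night_hours = []
-- 	# assumes index 0 is hour 0
-- 	hour = 0
-- 	daytime_length = NIGHTTIME_STARTHOUR - NIGHTTIME_ENDHOUR
-- 	while hour < total_hours:
-- 		night_hours += [h for h in range(hour, min((hour + NIGHTTIME_ENDHOUR), total_hours))]
-- 		hour += NIGHTTIME_ENDHOUR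
-- 		# skip the day time
-- 		hour += daytime_length
-- 		night_hours += [h for h in range(hour, min((hour + (24 - NIGHTTIME_STARTHOUR)), total_hours))]
-- 		hour += (24 - NIGHTTIME_STARTHOUR)
-- 	return night_hours
-- ===== SOURCE B (Python) =====
-- NIGHTTIME_ENDHOUR = 9  # non inclusive
--
-- NIGHTTIME_STARTHOUR = 20  # inclusive
--
-- def get_nighttime_hours(total_hours):
--     # single uniform pass: keep an hour iff its hour-of-day is in a nighttime window
--     return [h for h in range(total_hours)
--             if h % 24 < NIGHTTIME_ENDHOUR or h % 24 >= NIGHTTIME_STARTHOUR]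
-- ===== Notes on version B (the rewrite author's own statement) =====
-- stated objective: simpler
-- what changed: Replaces A's while-loop cursor that stitches two explicit ranges per 24-hour day and manually skips the daytime block with a single uniform pass over range(total_hours) keeping each hour whose hour-of-day (h % 24) lies in a nighttime window.
import Mathlib
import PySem

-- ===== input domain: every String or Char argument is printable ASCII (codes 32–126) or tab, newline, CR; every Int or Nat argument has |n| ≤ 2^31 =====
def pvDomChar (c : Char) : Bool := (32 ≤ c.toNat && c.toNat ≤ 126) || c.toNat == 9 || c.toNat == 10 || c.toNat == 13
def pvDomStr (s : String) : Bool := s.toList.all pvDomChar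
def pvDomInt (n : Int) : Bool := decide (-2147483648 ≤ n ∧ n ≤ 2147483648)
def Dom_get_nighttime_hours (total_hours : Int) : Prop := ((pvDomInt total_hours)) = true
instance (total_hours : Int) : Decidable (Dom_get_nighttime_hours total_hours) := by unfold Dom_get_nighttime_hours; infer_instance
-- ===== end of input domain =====

-- B replaces A's per-day cursor that stitches two explicit ranges and skips the daytime
-- block by one uniform filter over all hours with a modular hour-of-day test (objective: simpler).

-- ===== PORT A =====
-- the while loop: state is (hour, night_hours); NIGHTTIME_ENDHOUR = 9, NIGHTTIME_STARTHOUR = 20.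
-- fuel is only a totality guard: hour advances by 24 > 0 each iteration, so
-- total_hours.toNat iterations always suffice (proved in pvLoop_eq below).
-- the list grown by 'night_hours += …' is produced as the iteration's two segments
-- followed by the remaining iterations' output (same segments, same order).
def pvALoop (total_hours : Int) : Nat → Int → List Int
  | 0, _ => []
  | fuel + 1, hour =>
    if hour < total_hours then
      let seg1 := PySem.List.pyRange hour (min (hour + 9) total_hours) 1
      let hour := hour + 9
      let hour := hour + (20 - 9)          -- skip the day time
      let seg2 := PySem.List.pyRange hour (min (hour + (24 - 20)) total_hours) 1
      seg1 ++ seg2 ++ pvALoop total_hours fuel (hour + (24 - 20))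
    else []

def get_nighttime_hours (total_hours : Int) : List Int :=
  pvALoop total_hours total_hours.toNat 0

-- ===== PORT B =====
-- the comprehension's condition: h % 24 < NIGHTTIME_ENDHOUR or h % 24 >= NIGHTTIME_STARTHOUR
def pvNight (h : Int) : Bool :=
  decide (PySem.Int.mod h 24 < 9) || decide (20 ≤ PySem.Int.mod h 24)

def get_nighttime_hours_alt (total_hours : Int) : List Int :=
  (PySem.List.pyRange 0 total_hours 1).filter pvNight

-- ===== PRECONDITION & SPEC =====
def Spec_get_nighttime_hours (total_hours : Int) (out : List Int) : Prop := out = get_nighttime_hours_alt total_hours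
instance (total_hours : Int) (out : List Int) : Decidable (Spec_get_nighttime_hours total_hours out) := by unfold Spec_get_nighttime_hours; infer_instance

-- ===== CLAIM (what is proved, stated in full; the proofs are below) =====
def Claim_equal_get_nighttime_hours : Prop := ∀ (total_hours : Int), Dom_get_nighttime_hours total_hours → Spec_get_nighttime_hours total_hours (get_nighttime_hours total_hours)

-- ===== LEMMAS AND PROOFS =====

-- the predicate, evaluated on an hour of a day that starts at a (a ≥ 0, a ≡ 0 mod 24)
theorem pvNight_eval (a h : Int) (ha : 0 ≤ a) (hm : a % 24 = 0)
    (h1 : a ≤ h) (h2 : h < a + 24) :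
    pvNight h = (decide (h - a < 9) || decide (20 ≤ h - a)) := by
  have hmod : PySem.Int.mod h 24 = h % 24 :=
    PySem.Int.mod_eq_emod_of_pos (a := h) (by norm_num)
  have : h % 24 = h - a := by omega
  simp [pvNight, hmod, this]

-- one 24-hour chunk: the two stitched ranges of A are the filtered full-day range
theorem pvChunk (a b : Int) (ha : 0 ≤ a) (hm : a % 24 = 0) (hab : a ≤ b) :
    (PySem.List.pyRange a (min (a + 24) b) 1).filter pvNight
      = PySem.List.pyRange a (min (a + 9) b) 1
        ++ PySem.List.pyRange (a + 20) (min (a + 24) b) 1 := by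
  set m1 := min (a + 9) b with hm1
  set m2 := min (a + 20) b with hm2
  set m3 := min (a + 24) b with hm3
  have hsplit1 : PySem.List.pyRange a m3 1
      = PySem.List.pyRange a m1 1 ++ PySem.List.pyRange m1 m3 1 :=
    PySem.List.pyRange_one_append a m1 m3 (by omega) (by omega)
  have hsplit2 : PySem.List.pyRange m1 m3 1
      = PySem.List.pyRange m1 m2 1 ++ PySem.List.pyRange m2 m3 1 :=
    PySem.List.pyRange_one_append m1 m2 m3 (by omega) (by omega)
  have hf1 : (PySem.List.pyRange a m1 1).filter pvNight = PySem.List.pyRange a m1 1 := by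
    apply List.filter_eq_self.mpr
    intro x hx
    rw [PySem.List.mem_pyRange_one] at hx
    rw [pvNight_eval a x ha hm (by omega) (by omega)]
    simp; omega
  have hf2 : (PySem.List.pyRange m1 m2 1).filter pvNight = [] := by
    apply List.filter_eq_nil_iff.mpr
    intro x hx
    rw [PySem.List.mem_pyRange_one] at hx
    rw [pvNight_eval a x ha hm (by omega) (by omega)]
    simp; omega
  have hf3 : (PySem.List.pyRange m2 m3 1).filter pvNight = PySem.List.pyRange m2 m3 1 := by
    apply List.filter_eq_self.mpr
    intro x hx
    rw [PySem.List.mem_pyRange_one] at hx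
    rw [pvNight_eval a x ha hm (by omega) (by omega)]
    simp; omega
  have htail : PySem.List.pyRange m2 m3 1 = PySem.List.pyRange (a + 20) m3 1 := by
    by_cases hb : a + 20 ≤ b
    · have : m2 = a + 20 := by omega
      rw [this]
    · have hm2b : m2 = b := by omega
      have hm3b : m3 = b := by omega
      rw [hm2b, hm3b, PySem.List.pyRange_one_eq_nil (by omega),
        PySem.List.pyRange_one_eq_nil (by omega)]
  rw [hsplit1, hsplit2, List.filter_append, List.filter_append, hf1, hf2, hf3, htail]
  simp

-- loop invariant: starting at a day boundary a, the loop appends the filtered range [a, T)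
theorem pvLoop_eq (T : Int) : ∀ (n : Nat) (a : Int),
    (T - a).toNat ≤ n → 0 ≤ a → a % 24 = 0 →
    pvALoop T n a = (PySem.List.pyRange a T 1).filter pvNight := by
  intro n
  induction n with
  | zero =>
    intro a hn ha hm
    have hTa : T ≤ a := by omega
    rw [pvALoop, PySem.List.pyRange_one_eq_nil hTa]
    simp
  | succ n ih =>
    intro a hn ha hm
    by_cases hlt : a < T
    · rw [pvALoop, if_pos hlt]
      have harith1 : a + 9 + (20 - 9) = a + 20 := by ring
      have harith2 : a + 20 + (24 - 20) = a + 24 := by ring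
      have harith3 : a + 20 + (24 - 20) + (24 - 20) = a + 28 := by ring
      simp only [harith1, harith2]
      rw [ih (a + 24) (by omega) (by omega) (by omega)]
      have hsplit : PySem.List.pyRange a T 1
          = PySem.List.pyRange a (min (a + 24) T) 1
            ++ PySem.List.pyRange (min (a + 24) T) T 1 :=
        PySem.List.pyRange_one_append a (min (a + 24) T) T (by omega) (by omega)
      have htail : PySem.List.pyRange (min (a + 24) T) T 1
          = PySem.List.pyRange (a + 24) T 1 := by
        by_cases hb : a + 24 ≤ T
        · have : min (a + 24) T = a + 24 := by omega
          rw [this]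
        · have : min (a + 24) T = T := by omega
          rw [this, PySem.List.pyRange_one_eq_nil le_rfl,
            PySem.List.pyRange_one_eq_nil (by omega)]
      rw [hsplit, List.filter_append, htail, pvChunk a T ha hm (by omega)]
    · rw [pvALoop, if_neg hlt, PySem.List.pyRange_one_eq_nil (by omega)]
      simp

-- ===== VERDICT (by name: the statement is the Claim_ definition above) =====
theorem get_nighttime_hours_spec : Claim_equal_get_nighttime_hours := by
  intro T _
  unfold Spec_get_nighttime_hours get_nighttime_hours get_nighttime_hours_alt
  rw [pvLoop_eq T T.toNat 0 (by omega) le_rfl (by omega)]
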